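-- pv_equiv track=rewrite | github.com/embrodski/automated-video-editing | generate_reading_dsl.py | split_article_line
-- ===== SOURCE A (Python) =====
-- from typing import List, Optional, Tuple
--
-- SENTENCE_TERMINALS = ".?!:;"
--
-- ABBREVIATIONS = frozenset({
--     "mr", "mrs", "ms", "dr", "prof", "sr", "jr", "st", "ave", "mt",
--     "etc", "vs", "eg", "ie", "fig", "no", "vol", "ch",
-- })
--
-- def split_article_line(line: str) -> List[str]:
--     """Split one article line into sentence-like chunks at . ? ! : ; (skipping abbreviations).
--     If the line has no terminal punctuation, return it as a single chunk."""
--     line = line.strip()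
--     if not line:
--         return []
--
--     words = line.split()
--     sentences: List[str] = []
--     current: List[str] = []
--     for w in words:
--         current.append(w)
--         if not w:
--             continue
--         last = w[-1]
--         if last not in SENTENCE_TERMINALS:
--             continue
--         if w.endswith("..."):
--             continue
--         stripped = w.rstrip(SENTENCE_TERMINALS + ",\"'`)")
--         stripped_low = stripped.lower().rstrip(".")
--         if stripped_low in ABBREVIATIONS:
--             continue
--         sentences.append(" ".join(current))
--         current = []
--     if current:
--         sentences.append(" ".join(current))
--     return sentences
-- ===== SOURCE B (Python) =====
-- from typing import List
--
-- SENTENCE_TERMINALS = ".?!:;"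
--
-- ABBREVIATIONS = frozenset({
--     "mr", "mrs", "ms", "dr", "prof", "sr", "jr", "st", "ave", "mt",
--     "etc", "vs", "eg", "ie", "fig", "no", "vol", "ch",
-- })
--
--
-- def _is_boundary(w: str) -> bool:
--     """Does this word end a sentence-like chunk?"""
--     if not w or w[-1] not in SENTENCE_TERMINALS:
--         return False
--     if w.endswith("..."):
--         return False
--     return w.rstrip(SENTENCE_TERMINALS + ",\"'`)").lower() not in ABBREVIATIONS
--
--
-- def split_article_line(line: str) -> List[str]:
--     # Walk the words back-to-front, grouping each word onto the chunk in
--     # front of it and starting a fresh chunk at every boundary word.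
--     words = line.strip().split()
--     groups: List[List[str]] = []   # chunks in reverse order, words reversed
--     for w in reversed(words):
--         if _is_boundary(w) or not groups:
--             groups.append([w])
--         else:
--             groups[-1].append(w)
--     return [" ".join(reversed(g)) for g in reversed(groups)]
-- ===== Notes on version B (the rewrite author's own statement) =====
-- stated objective: alternative
-- what changed: B replaces A's forward accumulator loop (append each word to `current`, flush on a boundary) by a back-to-front grouping pass: it walks the words in reverse, starting a fresh chunk at every boundary word and attaching other words to the chunk in front of them, with the boundary test factored into a predicate.
import Mathlib
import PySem

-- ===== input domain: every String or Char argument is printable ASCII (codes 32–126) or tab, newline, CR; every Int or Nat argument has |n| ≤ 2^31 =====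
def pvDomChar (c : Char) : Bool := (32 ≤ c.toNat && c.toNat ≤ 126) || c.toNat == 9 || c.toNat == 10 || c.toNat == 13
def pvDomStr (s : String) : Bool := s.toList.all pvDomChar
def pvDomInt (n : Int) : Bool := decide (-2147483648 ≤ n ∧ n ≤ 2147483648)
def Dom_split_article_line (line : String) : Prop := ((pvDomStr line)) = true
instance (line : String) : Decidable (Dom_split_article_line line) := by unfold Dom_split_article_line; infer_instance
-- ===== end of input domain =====

-- B regroups the words back-to-front with a boundary predicate instead of A's forward
-- accumulator loop (objective: alternative decomposition, same cost).

-- shared module-level constants of the Python module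
def SENTENCE_TERMINALS : String := ".?!:;"

def ABBREVIATIONS : PySem.Set String := PySem.Set.ofList
  ["mr", "mrs", "ms", "dr", "prof", "sr", "jr", "st", "ave", "mt",
   "etc", "vs", "eg", "ie", "fig", "no", "vol", "ch"]

-- SENTENCE_TERMINALS + ",\"'`)"  (written as one literal; String.append is opaque to the kernel)
def STRIP_CHARS : String := ".?!:;,\"'`)"

-- exact hand port of Python str.rstrip(chars): drop trailing chars that occur in `chars`
def pyRstripChars (s chars : String) : String :=
  String.ofList ((s.toList.reverse.dropWhile (fun c => chars.toList.contains c)).reverse)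

-- ===== PORT A =====
-- the `for w in words` loop with its post-loop `if current:` flush folded into the base case
def loopA : List String → List String → List String → List String
  | [], sentences, current =>
      if current.isEmpty then sentences else sentences ++ [PySem.Str.join " " current]
  | w :: ws, sentences, current =>
      let current := current ++ [w]
      if PySem.Str.len w = 0 then loopA ws sentences current        -- if not w: continue
      else
        -- last = w[-1]  (guarded: w is nonempty here, so pyGet? is some)
        let last := (PySem.Str.pyGet? w (-1)).getD ' '
        -- single-char `last not in SENTENCE_TERMINALS` = char membership (exact)
        if !(SENTENCE_TERMINALS.toList.contains last) then loopA ws sentences current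
        else if PySem.Str.endswith w "..." then loopA ws sentences current
        else
          let stripped := pyRstripChars w STRIP_CHARS
          let stripped_low := pyRstripChars (PySem.Str.lower stripped) "."
          if PySem.Set.contains ABBREVIATIONS stripped_low then loopA ws sentences current
          else loopA ws (sentences ++ [PySem.Str.join " " current]) []

def split_article_line (line : String) : List String :=
  let line := PySem.Str.strip line
  if line = "" then []
  else loopA (PySem.Str.split₀ line) [] []

-- ===== PORT B =====
-- Source B's _is_boundary (the `not w or w[-1] not in …` guard is the none-case of pyGet?)
def isBoundaryB (w : String) : Bool :=
  match PySem.Str.pyGet? w (-1) with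
  | none => false
  | some last =>
    if !(SENTENCE_TERMINALS.toList.contains last) then false
    else if PySem.Str.endswith w "..." then false
    else !(PySem.Set.contains ABBREVIATIONS (PySem.Str.lower (pyRstripChars w STRIP_CHARS)))

-- one step of Source B's `for w in reversed(words)` loop.  Source B appends at the END of `groups`
-- and at the end of each group; the Lean state keeps both lists REVERSED (head = python's
-- last element), so python's `groups.append([w])` is `[w] :: gs`, `groups[-1].append(w)` is
-- `(w :: g) :: rest`, and the final `reversed(groups)` / `reversed(g)` are the identity here.
def stepB (gs : List (List String)) (w : String) : List (List String) :=
  match gs with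
  | [] => [[w]]
  | g :: rest => if isBoundaryB w then [w] :: g :: rest else (w :: g) :: rest

def split_article_line_alt (line : String) : List String :=
  let words := PySem.Str.split₀ (PySem.Str.strip line)
  let gs := words.reverse.foldl stepB []
  gs.map (fun g => PySem.Str.join " " g)

-- ===== PRECONDITION & SPEC =====
def Spec_split_article_line (line : String) (out : List String) : Prop := out = split_article_line_alt line
instance (line : String) (out : List String) : Decidable (Spec_split_article_line line out) := by unfold Spec_split_article_line; infer_instance

-- ===== CLAIM (what is proved, stated in full; the proofs are below) =====
def Claim_equal_split_article_line : Prop := ∀ (line : String), Dom_split_article_line line → Spec_split_article_line line (split_article_line line)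

-- ===== LEMMAS AND PROOFS =====

-- head of a dropWhile result fails the predicate
lemma dropWhile_head_false {α : Type} (p : α → Bool) : ∀ (l : List α) (c : α) (t : List α),
    l.dropWhile p = c :: t → p c = false := by
  intro l
  induction l with
  | nil => intro c t h; simp [List.dropWhile] at h
  | cons a l ih =>
    intro c t h
    rw [List.dropWhile_cons] at h
    by_cases hp : p a = true
    · rw [if_pos hp] at h; exact ih c t h
    · rw [if_neg hp] at h
      cases h
      simpa using hp

-- lowering a character other than '.' never yields '.'
lemma lowerChar_ne_dot (c : Char) (hc : c ≠ '.') : PySem.Chars.lowerChar c ≠ '.' := by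
  unfold PySem.Chars.lowerChar
  by_cases h : PySem.Chars.isupper c = true
  · rw [if_pos h]
    unfold PySem.Chars.isupper at h
    simp only [Bool.and_eq_true, decide_eq_true_eq] at h
    obtain ⟨h1, h2⟩ := h
    simp only [Char.le_def, UInt32.le_iff_toNat_le] at h1 h2
    have hA : ('A' : Char).val.toNat = 65 := rfl
    have hZ : ('Z' : Char).val.toNat = 90 := rfl
    intro heq
    have h3 := congrArg Char.toNat heq
    have hv : (Char.ofNat (c.toNat + 32)).toNat = c.toNat + 32 := by
      rw [Char.ofNat, dif_pos (Or.inl (by show c.val.toNat + 32 < 55296; omega))]; rfl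
    rw [hv] at h3
    have hd : ('.' : Char).toNat = 46 := rfl
    rw [hd] at h3
    show False
    have : c.val.toNat + 32 = 46 := h3
    omega
  · rw [if_neg h]; exact hc

-- A's extra `.rstrip(".")` after lowering is a no-op: the rstrip over STRIP_CHARS already
-- removed every trailing '.', and lowering cannot create one.
lemma rstrip_dot_noop (w : String) :
    pyRstripChars (PySem.Str.lower (pyRstripChars w STRIP_CHARS)) "." =
      PySem.Str.lower (pyRstripChars w STRIP_CHARS) := by
  unfold pyRstripChars
  set p : Char → Bool := fun c => STRIP_CHARS.toList.contains c with hp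
  set r : List Char := w.toList.reverse.dropWhile p with hr
  have htl : (PySem.Str.lower (String.ofList r.reverse)).toList
      = (r.map PySem.Chars.lowerChar).reverse := by
    simp [PySem.Str.toList_lower, PySem.Chars.lower, List.map_reverse]
  rw [htl]
  have hdw : (r.map PySem.Chars.lowerChar).reverse.reverse.dropWhile
      (fun c => (".".toList).contains c) = r.map PySem.Chars.lowerChar := by
    rw [List.reverse_reverse]
    cases hcase : r with
    | nil => simp
    | cons c t =>
      have hpc : p c = false := by
        exact dropWhile_head_false p _ c t (hr ▸ hcase)
      have hcdot : c ≠ '.' := by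
        intro h; rw [h] at hpc
        have : p '.' = true := by rw [hp]; decide
        simp [this] at hpc
      have : (fun c => (".".toList).contains c) (PySem.Chars.lowerChar c) = false := by
        have hne := lowerChar_ne_dot c hcdot
        have hl : (".".toList) = ['.'] := rfl
        rw [hl]
        simp only [List.contains_cons, List.contains_nil, Bool.or_false,
          beq_eq_false_iff_ne]
        exact hne
      simp only [List.map_cons, List.dropWhile_cons, this]
      simp
  rw [hdw, ← htl]
  exact String.ofList_toList

-- pyGet? (-1) on strings: none on the empty list, the last element otherwise
lemma pyGet_neg_one_nil {α : Type} : PySem.List.pyGet? ([] : List α) (-1) = none := by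
  simp [PySem.List.pyGet?, PySem.List.pyIdx?]

lemma pyGet_neg_one_concat {α : Type} (l : List α) (a : α) :
    PySem.List.pyGet? (l ++ [a]) (-1) = some a := by
  simp only [PySem.List.pyGet?, PySem.List.pyIdx?, List.length_append, List.length_cons,
    List.length_nil]
  rw [if_neg (by omega), if_pos (by push_cast; omega)]
  norm_num

-- one step of A's loop is exactly: flush iff the word is a boundary word
lemma loopA_cons (w : String) (ws sents cur : List String) :
    loopA (w :: ws) sents cur =
      if isBoundaryB w then loopA ws (sents ++ [PySem.Str.join " " (cur ++ [w])]) []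
      else loopA ws sents (cur ++ [w]) := by
  rcases List.eq_nil_or_concat w.toList with hnil | ⟨l, c, hcat⟩
  · have hlen : PySem.Str.len w = 0 := by simp [PySem.Str.len_eq, hnil]
    have hb : isBoundaryB w = false := by
      unfold isBoundaryB
      simp only [PySem.Str.pyGet?_eq, PySem.Chars.pyGet?_eq_listPyGet?, hnil, pyGet_neg_one_nil]
    rw [hb]
    simp only [Bool.false_eq_true, if_false]
    simp only [loopA]
    rw [if_pos hlen]
  · rw [List.concat_eq_append] at hcat
    have hlen : ¬ (PySem.Str.len w = 0) := by
      simp only [PySem.Str.len_eq, hcat, List.length_append, List.length_cons,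
        List.length_nil]
      omega
    have hget : PySem.Str.pyGet? w (-1) = some c := by
      simp only [PySem.Str.pyGet?_eq, PySem.Chars.pyGet?_eq_listPyGet?, hcat,
        pyGet_neg_one_concat]
    have hbnd : isBoundaryB w =
        (if !(SENTENCE_TERMINALS.toList.contains c) then false
         else if PySem.Str.endswith w "..." then false
         else !(PySem.Set.contains ABBREVIATIONS
            (PySem.Str.lower (pyRstripChars w STRIP_CHARS)))) := by
      unfold isBoundaryB
      rw [hget]
    simp only [loopA]
    rw [if_neg hlen, hget, hbnd]
    simp only [Option.getD_some, rstrip_dot_noop]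
    cases hC1 : SENTENCE_TERMINALS.toList.contains c <;>
      cases hC2 : PySem.Str.endswith w "..." <;>
        cases hC3 : PySem.Set.contains ABBREVIATIONS
            (PySem.Str.lower (pyRstripChars w STRIP_CHARS)) <;>
          simp

-- A's loop state, characterised: the pending words `cur` extended by grouping `ws`
def gwith (cur : List String) : List String → List (List String)
  | [] => if cur.isEmpty then [] else [cur]
  | w :: ws => if isBoundaryB w then (cur ++ [w]) :: gwith [] ws else gwith (cur ++ [w]) ws

lemma loopA_eq (ws : List String) : ∀ sents cur,
    loopA ws sents cur = sents ++ (gwith cur ws).map (PySem.Str.join " ") := by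
  induction ws with
  | nil =>
    intro sents cur
    unfold loopA gwith
    by_cases h : cur.isEmpty
    · simp [h]
    · simp [h]
  | cons w ws ih =>
    intro sents cur
    rw [loopA_cons]
    unfold gwith
    by_cases h : isBoundaryB w
    · simp [h, ih]
    · simp [h, ih]

-- B's grouping as a foldr (= the foldl over the reversed word list)
def gB (ws : List String) : List (List String) := ws.foldr (fun w gs => stepB gs w) []

-- merge pending words into the front group
def prependPending (cur : List String) (gs : List (List String)) : List (List String) :=
  if cur.isEmpty then gs
  else match gs with
    | [] => [cur]
    | g :: rest => (cur ++ g) :: rest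

lemma gwith_eq_prepend (ws : List String) : ∀ cur,
    gwith cur ws = prependPending cur (gB ws) := by
  induction ws with
  | nil =>
    intro cur
    unfold gwith gB prependPending
    by_cases h : cur.isEmpty <;> simp [h]
  | cons w ws ih =>
    intro cur
    have hgB : gB (w :: ws) = stepB (gB ws) w := rfl
    unfold gwith
    rw [ih, ih, hgB]
    by_cases hb : isBoundaryB w
    · cases hgs : gB ws with
      | nil =>
        unfold stepB prependPending
        by_cases h : cur.isEmpty <;> simp_all
      | cons g rest =>
        unfold stepB prependPending
        by_cases h : cur.isEmpty <;> simp_all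
    · cases hgs : gB ws with
      | nil =>
        unfold stepB prependPending
        by_cases h : cur.isEmpty <;> simp_all
      | cons g rest =>
        unfold stepB prependPending
        by_cases h : cur.isEmpty <;> simp_all

lemma split0_empty : PySem.Str.split₀ "" = [] := by decide

-- ===== VERDICT (by name: the statement is the Claim_ definition above) =====
theorem split_article_line_spec : Claim_equal_split_article_line := by
  intro line _
  unfold Spec_split_article_line split_article_line split_article_line_alt
  by_cases hs : PySem.Str.strip line = ""
  · simp [hs, split0_empty]
  · rw [if_neg hs]
    rw [loopA_eq, gwith_eq_prepend]
    have h1 : prependPending [] (gB (PySem.Str.split₀ (PySem.Str.strip line)))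
        = gB (PySem.Str.split₀ (PySem.Str.strip line)) := by
      unfold prependPending; simp
    rw [h1]
    simp only [List.nil_append, List.foldl_reverse]
    rfl
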